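-- pv_equiv track=rewrite | github.com/wikimedia/research-navigation-vectors | src/get_sessions.py | filter_consecutive_articles
-- ===== SOURCE A (Python) =====
-- def filter_consecutive_articles(requests):
--     """
--     Looking at the data, there are a lot of
--     sessions with the same article
--     requested 2 times in a row. This
--     does not make sense for training, so
--     lets collapse them into 1 request
--     """
--     r = requests[0]
--     t = r['title']
--     clean_rs = [r, ]
--     prev_t = t
--     for r in requests[1:]:
--         t = r['title']
--         if t == prev_t:
--             continue
--         else:
--             clean_rs.append(r)
--             prev_t = t
--     return clean_rs
-- ===== SOURCE B (Python) =====
-- def filter_consecutive_articles(requests):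
--     """Divide and conquer: dedup each half recursively, then merge the halves,
--     dropping the right half's first request when it continues the left half's
--     last same-title run."""
--     n = len(requests)
--     if n <= 1:
--         return list(requests)
--     left = filter_consecutive_articles(requests[:n // 2])
--     right = filter_consecutive_articles(requests[n // 2:])
--     if left[-1]['title'] == right[0]['title']:
--         right = right[1:]
--     return left + right
-- ===== Notes on version B (the rewrite author's own statement) =====
-- stated objective: alternative
-- what changed: Replaces A's single linear pass with a previous-title state variable by a divide-and-conquer: each half is deduplicated recursively and the halves are merged, dropping the right half's first request when its title equals the left half's last title.
import Mathlib
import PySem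

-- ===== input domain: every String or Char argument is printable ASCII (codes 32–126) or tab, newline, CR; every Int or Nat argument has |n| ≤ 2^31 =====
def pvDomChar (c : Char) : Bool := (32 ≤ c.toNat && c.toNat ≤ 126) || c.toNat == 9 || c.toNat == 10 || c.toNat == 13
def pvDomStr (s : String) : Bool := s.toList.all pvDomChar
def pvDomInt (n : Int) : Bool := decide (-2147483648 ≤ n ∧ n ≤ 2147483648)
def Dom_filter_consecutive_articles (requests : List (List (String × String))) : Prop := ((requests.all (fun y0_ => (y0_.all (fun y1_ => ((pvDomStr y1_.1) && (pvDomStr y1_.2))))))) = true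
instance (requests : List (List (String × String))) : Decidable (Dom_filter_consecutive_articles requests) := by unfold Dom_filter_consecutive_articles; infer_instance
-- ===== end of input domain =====

-- B deduplicates consecutive same-title requests by divide and conquer (recurse on halves, merge) instead of A's linear prev-title scan; equivalence on Pre_ (non-empty, every dict has a 'title' key).


-- shared helper: Python's r['title'] on an association list (first match; default unreachable under Pre_)
def pvTitle (r : List (String × String)) : String :=
  ((r.find? (fun p => p.1 == "title")).map Prod.snd).getD ""

-- ===== PORT A =====
-- loop body: t = r['title']; if t == prev_t: continue; else: clean_rs.append(r); prev_t = t
def pvStepA (st : List (List (String × String)) × String) (q : List (String × String)) :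
    List (List (String × String)) × String :=
  let t := pvTitle q
  if t == st.2 then st else (st.1 ++ [q], t)

-- r = requests[0]; prev_t = r['title']; clean_rs = [r]; loop over requests[1:]
def filter_consecutive_articles (requests : List (List (String × String))) : List (List (String × String)) :=
  match requests with
  | [] => []   -- unreachable under Pre_: requests[0] raises IndexError
  | r :: rest => (rest.foldl pvStepA ([r], pvTitle r)).1

-- ===== PORT B =====
-- divide and conquer: dedup each half, then merge; left[-1] / right[0] are ported with
-- getLastD [] / headD [] — the default is a totality guard only (on the recursive calls both
-- halves are non-empty, exactly where Python reads left[-1] and right[0])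
def filter_consecutive_articles_alt (requests : List (List (String × String))) : List (List (String × String)) :=
  if requests.length ≤ 1 then requests
  else
    let left := filter_consecutive_articles_alt (requests.take (requests.length / 2))
    let right := filter_consecutive_articles_alt (requests.drop (requests.length / 2))
    if pvTitle (left.getLastD []) == pvTitle (right.headD []) then left ++ right.tail
    else left ++ right
  termination_by requests.length
  decreasing_by
  · simp only [List.length_take]; omega
  · simp only [List.length_drop]; omega

-- ===== PRECONDITION & SPEC =====
-- Pre_ excludes exactly the inputs on which Python A raises: the empty list (IndexError on
-- requests[0]) and lists containing a dict without a 'title' key (KeyError).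
def Pre_filter_consecutive_articles (requests : List (List (String × String))) : Prop :=
  requests ≠ [] ∧ ∀ r ∈ requests, (r.any (fun p => p.1 == "title")) = true
instance (requests : List (List (String × String))) : Decidable (Pre_filter_consecutive_articles requests) := by unfold Pre_filter_consecutive_articles; infer_instance

def pvWitness_filter_consecutive_articles : (List (List (String × String))) :=
  [[("title", "A"), ("ts", "1")], [("title", "A")], [("title", "B")]]

def Spec_filter_consecutive_articles (requests : List (List (String × String))) (out : List (List (String × String))) : Prop := out = filter_consecutive_articles_alt requests
instance (requests : List (List (String × String))) (out : List (List (String × String))) : Decidable (Spec_filter_consecutive_articles requests out) := by unfold Spec_filter_consecutive_articles; infer_instance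

-- ===== CLAIM (what is proved, stated in full; the proofs are below) =====
def Claim_equal_filter_consecutive_articles : Prop := ∀ (requests : List (List (String × String))), Dom_filter_consecutive_articles requests → Pre_filter_consecutive_articles requests → Spec_filter_consecutive_articles requests (filter_consecutive_articles requests)

-- ===== LEMMAS AND PROOFS =====

-- reference function: first element of each consecutive run, previous title = prev
def pvFirsts (prev : String) : List (List (String × String)) → List (List (String × String))
  | [] => []
  | q :: qs => if pvTitle q = prev then pvFirsts prev qs else q :: pvFirsts (pvTitle q) qs

-- canonical consecutive dedup
def pvCd : List (List (String × String)) → List (List (String × String))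
  | [] => []
  | r :: rs => r :: pvFirsts (pvTitle r) rs

-- title of the last element, default p
def pvLastT (p : String) (xs : List (List (String × String))) : String :=
  (xs.getLast?).elim p pvTitle

lemma foldl_eq_firsts (l : List (List (String × String)))
    (acc : List (List (String × String))) (prev : String) :
    (l.foldl pvStepA (acc, prev)).1 = acc ++ pvFirsts prev l := by
  induction l generalizing acc prev with
  | nil => simp [pvFirsts]
  | cons q qs ih =>
      rw [List.foldl_cons]
      by_cases h : pvTitle q = prev
      · have e : pvStepA (acc, prev) q = (acc, prev) := by simp [pvStepA, h]
        rw [e, ih]; simp [pvFirsts, h]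
      · have e : pvStepA (acc, prev) q = (acc ++ [q], pvTitle q) := by simp [pvStepA, h]
        rw [e, ih]; simp [pvFirsts, h]

lemma lastT_cons (p : String) (q : List (String × String)) (qs : List (List (String × String))) :
    pvLastT p (q :: qs) = pvLastT (pvTitle q) qs := by
  cases qs with
  | nil => simp [pvLastT]
  | cons a as =>
      simp only [pvLastT, List.getLast?_cons_cons]
      cases h : (a :: as).getLast? with
      | none => simp at h
      | some b => simp

lemma firsts_append (p : String) (xs ys : List (List (String × String))) :
    pvFirsts p (xs ++ ys) = pvFirsts p xs ++ pvFirsts (pvLastT p xs) ys := by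
  induction xs generalizing p with
  | nil => simp [pvFirsts, pvLastT]
  | cons q qs ih =>
      rw [List.cons_append, pvFirsts, pvFirsts, lastT_cons]
      by_cases h : pvTitle q = p
      · rw [if_pos h, if_pos h, h, ih]
      · rw [if_neg h, if_neg h, ih, List.cons_append]

lemma lastT_firsts (p : String) (xs : List (List (String × String))) :
    pvLastT p (pvFirsts p xs) = pvLastT p xs := by
  induction xs generalizing p with
  | nil => rfl
  | cons q qs ih =>
      rw [pvFirsts, lastT_cons]
      by_cases h : pvTitle q = p
      · rw [if_pos h, ih, h]
      · rw [if_neg h, lastT_cons, ih]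

lemma lastT_eq_getLastD (p : String) (x : List (String × String))
    (xs : List (List (String × String))) :
    pvLastT p (x :: xs) = pvTitle ((x :: xs).getLastD []) := by
  induction xs generalizing p x with
  | nil => simp [pvLastT]
  | cons a as ih =>
      rw [lastT_cons, show (x :: a :: as).getLastD [] = (a :: as).getLastD [] by
        simp [List.getLastD]]
      exact ih (pvTitle x) a

lemma cd_merge (x y : List (String × String)) (xs ys : List (List (String × String))) :
    pvCd ((x :: xs) ++ (y :: ys)) =
      (if pvTitle ((pvCd (x :: xs)).getLastD []) == pvTitle ((pvCd (y :: ys)).headD [])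
       then pvCd (x :: xs) ++ (pvCd (y :: ys)).tail
       else pvCd (x :: xs) ++ pvCd (y :: ys)) := by
  rw [List.cons_append]
  simp only [pvCd, List.headD_cons, List.tail_cons]
  rw [← lastT_eq_getLastD (pvTitle x), lastT_cons, lastT_firsts, firsts_append]
  by_cases h : pvTitle y = pvLastT (pvTitle x) xs
  · rw [if_pos (by simp [h]), pvFirsts, if_pos h, h, List.cons_append]
  · rw [if_neg (by simpa using fun h2 => h h2.symm), pvFirsts, if_neg h, List.cons_append]

-- B computes pvCd: strong induction on a length bound, following the halving recursion
lemma alt_eq_cd_aux : ∀ n : Nat, ∀ xs : List (List (String × String)),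
    xs.length ≤ n → filter_consecutive_articles_alt xs = pvCd xs := by
  intro n
  induction n using Nat.strong_induction_on with
  | _ n ih =>
    intro xs hlen
    rw [filter_consecutive_articles_alt]
    by_cases h : xs.length ≤ 1
    · rw [if_pos h]
      match xs, h with
      | [], _ => rfl
      | [x], _ => simp [pvCd, pvFirsts]
    · rw [if_neg h]
      have h2 : 2 ≤ xs.length := by omega
      have hn : 2 ≤ n := le_trans h2 hlen
      have htl : (xs.take (xs.length / 2)).length = xs.length / 2 := by
        simp; omega
      have hdl : (xs.drop (xs.length / 2)).length = xs.length - xs.length / 2 := by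
        simp
      have e1 : filter_consecutive_articles_alt (xs.take (xs.length / 2)) =
          pvCd (xs.take (xs.length / 2)) :=
        ih (n - 1) (by omega) _ (by omega)
      have e2 : filter_consecutive_articles_alt (xs.drop (xs.length / 2)) =
          pvCd (xs.drop (xs.length / 2)) :=
        ih (n - 1) (by omega) _ (by omega)
      simp only [e1, e2]
      obtain ⟨a, as, ha⟩ : ∃ a as, xs.take (xs.length / 2) = a :: as := by
        cases hx : xs.take (xs.length / 2) with
        | nil => rw [hx] at htl; simp at htl; omega
        | cons a as => exact ⟨a, as, rfl⟩
      obtain ⟨b, bs, hb⟩ : ∃ b bs, xs.drop (xs.length / 2) = b :: bs := by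
        cases hx : xs.drop (xs.length / 2) with
        | nil => rw [hx] at hdl; simp at hdl; omega
        | cons b bs => exact ⟨b, bs, rfl⟩
      rw [ha, hb, ← cd_merge]
      rw [← ha, ← hb, List.take_append_drop]

-- ===== VERDICT (by name: the statement is the Claim_ definition above) =====
theorem filter_consecutive_articles_spec : Claim_equal_filter_consecutive_articles := by
  intro requests _ hpre
  unfold Spec_filter_consecutive_articles
  rw [alt_eq_cd_aux requests.length requests le_rfl]
  obtain ⟨hne, -⟩ := hpre
  match requests, hne with
  | r :: rest, _ =>
      show (rest.foldl pvStepA ([r], pvTitle r)).1 = pvCd (r :: rest)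
      rw [foldl_eq_firsts, pvCd, List.singleton_append]
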